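-- pv_equiv track=rewrite | github.com/keyber/Licence | 3I005/Projet1/autres/projet1.py | compte_mot
-- ===== SOURCE A (Python) =====
-- def mot_apparait(mail, recherche):
--     for mot in mail.split(" "):
--         if mot == recherche:
--             return True
--     return False
--
-- def compte_mot(liste):
--     #dictionnaire comptant pour chaque mot le nombre de mail dans lequel il apparait
--     apparition = {}
--
--     #pour chaque mail
--     for i in range(len(liste)):
--         s = liste[i]
--
--         #pour chacun de ses mots
--         for mot in s.split(" "):
--
--
--             #regarde dans les mails suivants si il apparait
--             for j in range(i+1, len(liste)):
--                 autre = liste[j]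
--                 if autre != s and mot_apparait(autre, mot):
--                     if mot not in apparition :
--                         apparition[mot]=1
--                     else :
--                         apparition[mot]+=1
--
--     return apparition
-- ===== SOURCE B (Python) =====
-- def compte_mot(liste):
--     # pass 1: for each word, in how many mails it appears; for each mail text, how often it occurs
--     total_contain = {}
--     total_eq = {}
--     for s in liste:
--         for w in dict.fromkeys(s.split(" ")):
--             total_contain[w] = total_contain.get(w, 0) + 1
--         total_eq[s] = total_eq.get(s, 0) + 1
--     # pass 2: forward, keep counts over the prefix (including the current mail); the count of
--     # later distinct mails containing w is then a difference of totals and prefix counts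
--     apparition = {}
--     seen_contain = {}
--     seen_eq = {}
--     for s in liste:
--         words = s.split(" ")
--         for w in dict.fromkeys(words):
--             seen_contain[w] = seen_contain.get(w, 0) + 1
--         seen_eq[s] = seen_eq.get(s, 0) + 1
--         for w in words:
--             c = (total_contain.get(w, 0) - seen_contain.get(w, 0)) - (total_eq.get(s, 0) - seen_eq.get(s, 0))
--             if c != 0:
--                 apparition[w] = apparition.get(w, 0) + c
--     return apparition
-- ===== Notes on version B (the rewrite author's own statement) =====
-- stated objective: faster
-- what changed: Instead of scanning all later mails for every word occurrence of every mail (triple nested loop with a word re-scan per candidate mail), B makes two linear passes: one builds total counts (mails containing each word, multiplicity of each mail text), the second walks forward keeping prefix counts and reads each word's contribution off as a difference of total and prefix counts.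
import Mathlib
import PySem

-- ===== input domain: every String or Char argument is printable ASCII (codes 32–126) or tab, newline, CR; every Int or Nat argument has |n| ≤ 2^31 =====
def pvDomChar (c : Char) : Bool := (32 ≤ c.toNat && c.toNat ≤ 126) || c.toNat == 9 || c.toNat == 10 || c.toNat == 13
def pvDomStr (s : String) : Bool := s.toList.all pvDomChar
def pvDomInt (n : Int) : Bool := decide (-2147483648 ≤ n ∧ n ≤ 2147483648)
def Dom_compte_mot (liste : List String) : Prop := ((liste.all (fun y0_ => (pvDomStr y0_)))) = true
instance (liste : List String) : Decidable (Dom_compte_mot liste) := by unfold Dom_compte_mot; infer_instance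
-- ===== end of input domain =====

-- B replaces A's scan of all later mails for every word occurrence by two counting passes
-- (mails containing each word / multiplicity of each mail text), reading each contribution
-- off as a difference of total and prefix counts.

-- ===== PORT A =====
-- s.split(" "): the separator is the nonempty literal " ", so Python's split never raises
def pySplit (s : String) : List String := (PySem.Str.split? s " ").getD []

def mot_apparait (mail recherche : String) : Bool :=
  (pySplit mail).any (fun mot => mot == recherche)

def compte_mot (liste : List String) : List (String × Int) :=
  let apparition : PySem.Dict String Int := PySem.Dict.empty
  ((PySem.List.pyRange 0 (liste.length : Int) 1).foldl (fun ap i =>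
    let s := PySem.List.pyGetD liste i ""
    (pySplit s).foldl (fun ap mot =>
      (PySem.List.pyRange (i + 1) (liste.length : Int) 1).foldl (fun ap j =>
        let autre := PySem.List.pyGetD liste j ""
        if autre != s && mot_apparait autre mot then
          if !(ap.contains mot) then ap.insert mot 1
          else ap.modify mot 0 (· + 1)
        else ap) ap) ap) apparition).items

-- ===== PORT B =====
def compte_mot_alt (liste : List String) : List (String × Int) :=
  let totals := liste.foldl
    (fun (p : PySem.Dict String Int × PySem.Dict String Int) s =>
      ((PySem.List.dedup (pySplit s)).foldl
          (fun d w => d.insert w (d.getD w 0 + 1)) p.1,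
       p.2.insert s (p.2.getD s 0 + 1)))
    (PySem.Dict.empty, PySem.Dict.empty)
  let fin := liste.foldl
    (fun (st : PySem.Dict String Int × PySem.Dict String Int × PySem.Dict String Int) s =>
      let ws := pySplit s
      let sc := (PySem.List.dedup ws).foldl (fun d w => d.insert w (d.getD w 0 + 1)) st.2.1
      let se := st.2.2.insert s (st.2.2.getD s 0 + 1)
      let ap := ws.foldl (fun ap w =>
          let c := (totals.1.getD w 0 - sc.getD w 0) - (totals.2.getD s 0 - se.getD s 0)
          if c != 0 then ap.insert w (ap.getD w 0 + c) else ap) st.1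
      (ap, sc, se))
    (PySem.Dict.empty, PySem.Dict.empty, PySem.Dict.empty)
  fin.1.items

-- ===== PRECONDITION & SPEC =====
def Spec_compte_mot (liste : List String) (out : List (String × Int)) : Prop := out = compte_mot_alt liste
instance (liste : List String) (out : List (String × Int)) : Decidable (Spec_compte_mot liste out) := by unfold Spec_compte_mot; infer_instance

-- ===== CLAIM (what is proved, stated in full; the proofs are below) =====
def Claim_equal_compte_mot : Prop := ∀ (liste : List String), Dom_compte_mot liste → Spec_compte_mot liste (compte_mot liste)

-- ===== LEMMAS AND PROOFS =====

-- the common mathematical shape: process the mails front to back; at each mail, for each of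
-- its words add the number of LATER mails that differ from it and contain the word
def addC (ap : PySem.Dict String Int) (w : String) (c : Int) : PySem.Dict String Int :=
  if c = 0 then ap else ap.insert w (ap.getD w 0 + c)

def hitP (s w : String) : String → Bool := fun t => (t != s) && mot_apparait t w

def stepSpec (rest : List String) (ap : PySem.Dict String Int) (s : String) : PySem.Dict String Int :=
  (pySplit s).foldl (fun ap w => addC ap w ((rest.countP (hitP s w) : Int))) ap

def tailsFold : List String → PySem.Dict String Int → PySem.Dict String Int
  | [], ap => ap
  | s :: rest, ap => tailsFold rest (stepSpec rest ap s)

lemma mot_apparait_iff (t w : String) : mot_apparait t w = true ↔ w ∈ pySplit t := by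
  unfold mot_apparait
  rw [List.any_eq_true]
  constructor
  · rintro ⟨x, hx, hb⟩
    rw [beq_iff_eq] at hb
    exact hb ▸ hx
  · intro hw
    exact ⟨w, hw, beq_self_eq_true w⟩

lemma dedup_count_words (s w : String) :
    (PySem.List.dedup (pySplit s)).count w = (if mot_apparait s w = true then 1 else 0) := by
  by_cases h : mot_apparait s w = true
  · rw [if_pos h]
    exact List.count_eq_one_of_mem (PySem.List.nodup_dedup _)
      ((PySem.List.mem_dedup _ _).mpr ((mot_apparait_iff s w).mp h))
  · rw [if_neg h]
    refine List.count_eq_zero_of_not_mem ?_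
    intro hmem
    exact h ((mot_apparait_iff s w).mpr ((PySem.List.mem_dedup _ _).mp hmem))

lemma addC_insert_one (ap : PySem.Dict String Int) (w : String) (c : Nat) :
    addC (ap.insert w (ap.getD w 0 + 1)) w (c : Int) = addC ap w ((c : Int) + 1) := by
  unfold addC
  by_cases hc : c = 0
  · simp [hc]
  · have h1 : ((c : Int)) ≠ 0 := by exact_mod_cast hc
    have h2 : ((c : Int)) + 1 ≠ 0 := by omega
    rw [if_neg h1, if_neg h2, PySem.Dict.getD_insert_self, PySem.Dict.insert_insert_self]
    congr 1
    ring

-- A's per-hit dict update is one insert of the incremented value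
lemma bump_eq (ap : PySem.Dict String Int) (w : String) :
    (if !(ap.contains w) then ap.insert w 1 else ap.modify w 0 (· + 1))
      = ap.insert w (ap.getD w 0 + 1) := by
  cases h : ap.contains w with
  | false => simp [PySem.Dict.getD_of_not_contains ap 0 h]
  | true =>
    simp only [Bool.not_true, Bool.false_eq_true, if_false]
    exact PySem.Dict.ext_iff.mpr rfl

-- A's inner j-loop over the later mails is one bulk add of the hit count
lemma foldA_inner (s w : String) (rest : List String) (ap : PySem.Dict String Int) :
    rest.foldl (fun ap t =>
        if t != s && mot_apparait t w then
          if !(ap.contains w) then ap.insert w 1 else ap.modify w 0 (· + 1)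
        else ap) ap
      = addC ap w (rest.countP (hitP s w) : Int) := by
  induction rest generalizing ap with
  | nil => simp [addC]
  | cons t r ih =>
    simp only [List.foldl_cons]
    by_cases h : (t != s && mot_apparait t w) = true
    · rw [if_pos h, bump_eq, ih]
      have hc : (t :: r).countP (hitP s w) = r.countP (hitP s w) + 1 := by
        have : hitP s w t = true := h
        simp [this]
      rw [hc]
      push_cast
      exact addC_insert_one ap w (r.countP (hitP s w))
    · rw [if_neg h, ih]
      have hf : hitP s w t = false := by
        exact Bool.not_eq_true _ ▸ (by simpa [hitP] using h)
      simp [hf]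

-- splitting the hit count: among the later mails, those containing w are those equal to s
-- (all of which contain w, since w is a word of s) plus the distinct ones that contain w
lemma countP_split (s w : String) (rest : List String) (happ : mot_apparait s w = true) :
    rest.countP (fun t => mot_apparait t w)
      = rest.countP (hitP s w) + rest.count s := by
  induction rest with
  | nil => simp
  | cons t r ih =>
    simp only [List.countP_cons, List.count_cons, hitP]
    by_cases ht : t = s
    · subst ht
      simp [happ, ih]
      omega
    · have h1 : (t != s) = true := by simp [ht]
      simp [h1, ht, ih]
      by_cases h2 : mot_apparait t w = true
      · simp [h2]
        omega
      · simp [h2]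

-- ===== A = tailsFold =====

lemma A_range (liste : List String) :
    ∀ (m k : Nat), k + m = liste.length → ∀ (ap : PySem.Dict String Int),
      (PySem.List.pyRange (k : Int) (liste.length : Int) 1).foldl (fun ap i =>
        let s := PySem.List.pyGetD liste i ""
        (pySplit s).foldl (fun ap mot =>
          (PySem.List.pyRange (i + 1) (liste.length : Int) 1).foldl (fun ap j =>
            let autre := PySem.List.pyGetD liste j ""
            if autre != s && mot_apparait autre mot then
              if !(ap.contains mot) then ap.insert mot 1
              else ap.modify mot 0 (· + 1)
            else ap) ap) ap) ap
      = tailsFold (liste.drop k) ap := by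
  intro m
  induction m with
  | zero =>
    intro k hk ap
    have h1 : (liste.length : Int) ≤ (k : Int) := by omega
    rw [PySem.List.pyRange_one_eq_nil h1, List.drop_eq_nil_of_le (by omega)]
    simp [tailsFold]
  | succ m ih =>
    intro k hk ap
    have hklt : k < liste.length := by omega
    have h1 : (k : Int) < (liste.length : Int) := by exact_mod_cast hklt
    rw [PySem.List.pyRange_one_cons h1]
    simp only [List.foldl_cons]
    have hdrop : liste.drop k = liste[k] :: liste.drop (k + 1) :=
      List.drop_eq_getElem_cons hklt
    rw [hdrop]
    have hs : PySem.List.pyGetD liste (k : Int) "" = liste[k] := by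
      rw [PySem.List.pyGetD_natCast, List.getD_eq_getElem liste "" hklt]
    have hstep : ∀ (ap : PySem.Dict String Int),
        (pySplit liste[k]).foldl (fun ap mot =>
          (PySem.List.pyRange ((k : Int) + 1) (liste.length : Int) 1).foldl (fun ap j =>
            let autre := PySem.List.pyGetD liste j ""
            if autre != liste[k] && mot_apparait autre mot then
              if !(ap.contains mot) then ap.insert mot 1
              else ap.modify mot 0 (· + 1)
            else ap) ap) ap
        = stepSpec (liste.drop (k + 1)) ap liste[k] := by
      intro ap
      unfold stepSpec
      apply PySem.List.foldl_congr_mem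
      intro acc mot _
      have hcast : ((k : Int) + 1) = ((k + 1 : Nat) : Int) := by push_cast; ring
      rw [hcast,
        PySem.List.foldl_pyRange_pyGetD' liste ""
          (fun ap autre =>
            if autre != liste[k] && mot_apparait autre mot then
              if !(ap.contains mot) then ap.insert mot 1
              else ap.modify mot 0 (· + 1)
            else ap) acc (by positivity)]
      rw [Int.toNat_natCast]
      exact foldA_inner liste[k] mot (liste.drop (k + 1)) acc
    simp only [hs, tailsFold]
    rw [hstep]
    have : (k : Int) + 1 = ((k + 1 : Nat) : Int) := by push_cast; ring
    rw [this, ih (k + 1) (by omega)]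

lemma A_eq_tails (liste : List String) :
    compte_mot liste = (tailsFold liste PySem.Dict.empty).items := by
  unfold compte_mot
  have h := A_range liste liste.length 0 (by omega) PySem.Dict.empty
  rw [List.drop_zero] at h
  rw [show ((0 : Nat) : Int) = (0 : Int) by simp] at h
  exact congrArg PySem.Dict.items h

-- ===== B = tailsFold =====

-- first pass: pointwise values of the two total dicts
lemma B_pass1 (l : List String) :
    ∀ (tc te : PySem.Dict String Int),
      (∀ w, (l.foldl
        (fun (p : PySem.Dict String Int × PySem.Dict String Int) s =>
          ((PySem.List.dedup (pySplit s)).foldl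
              (fun d w => d.insert w (d.getD w 0 + 1)) p.1,
           p.2.insert s (p.2.getD s 0 + 1))) (tc, te)).1.getD w 0
        = tc.getD w 0 + (l.countP (fun t => mot_apparait t w) : Int))
      ∧ (∀ s', (l.foldl
        (fun (p : PySem.Dict String Int × PySem.Dict String Int) s =>
          ((PySem.List.dedup (pySplit s)).foldl
              (fun d w => d.insert w (d.getD w 0 + 1)) p.1,
           p.2.insert s (p.2.getD s 0 + 1))) (tc, te)).2.getD s' 0
        = te.getD s' 0 + (l.count s' : Int)) := by
  induction l with
  | nil => intro tc te; simp
  | cons s r ih =>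
    intro tc te
    simp only [List.foldl_cons]
    obtain ⟨ih1, ih2⟩ := ih
      ((PySem.List.dedup (pySplit s)).foldl
          (fun d w => d.insert w (d.getD w 0 + 1)) tc)
      (te.insert s (te.getD s 0 + 1))
    constructor
    · intro w
      rw [ih1 w, PySem.Dict.getD_foldl_insert_add_one]
      rw [dedup_count_words, List.countP_cons]
      by_cases h : mot_apparait s w = true
      · simp [h]
        omega
      · simp [h]
    · intro s'
      rw [ih2 s', PySem.Dict.getD_insert, List.count_cons]
      by_cases h : s' = s
      · subst h
        simp
        omega
      · have h2 : s ≠ s' := fun hh => h hh.symm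
        simp [h, h2]

-- second pass: the prefix counters turn each contribution into the later-mail hit count
lemma B_pass2 (tc te : PySem.Dict String Int) (full : List String)
    (htc : ∀ w, tc.getD w 0 = (full.countP (fun t => mot_apparait t w) : Int))
    (hte : ∀ s', te.getD s' 0 = (full.count s' : Int)) :
    ∀ (rest pre : List String), full = pre ++ rest →
    ∀ (ap sc se : PySem.Dict String Int),
      (∀ w, sc.getD w 0 = (pre.countP (fun t => mot_apparait t w) : Int)) →
      (∀ s', se.getD s' 0 = (pre.count s' : Int)) →
      (rest.foldl
        (fun (st : PySem.Dict String Int × PySem.Dict String Int × PySem.Dict String Int) s =>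
          let ws := pySplit s
          let sc := (PySem.List.dedup ws).foldl (fun d w => d.insert w (d.getD w 0 + 1)) st.2.1
          let se := st.2.2.insert s (st.2.2.getD s 0 + 1)
          let ap := ws.foldl (fun ap w =>
              let c := (tc.getD w 0 - sc.getD w 0) - (te.getD s 0 - se.getD s 0)
              if c != 0 then ap.insert w (ap.getD w 0 + c) else ap) st.1
          (ap, sc, se)) (ap, sc, se)).1
      = tailsFold rest ap := by
  intro rest
  induction rest with
  | nil => intro pre _ ap sc se _ _; simp [tailsFold]
  | cons s r ih =>
    intro pre hfull ap sc se hsc hse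
    simp only [List.foldl_cons]
    set sc' := (PySem.List.dedup (pySplit s)).foldl
        (fun d w => d.insert w (d.getD w 0 + 1)) sc with hsc'def
    set se' := se.insert s (se.getD s 0 + 1) with hse'def
    have hsc' : ∀ w, sc'.getD w 0 = ((pre ++ [s]).countP (fun t => mot_apparait t w) : Int) := by
      intro w
      rw [hsc'def, PySem.Dict.getD_foldl_insert_add_one, hsc w, List.countP_append]
      rw [dedup_count_words]
      by_cases h : mot_apparait s w = true
      · simp [h]
      · simp [h]
    have hse' : ∀ s', se'.getD s' 0 = ((pre ++ [s]).count s' : Int) := by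
      intro s'
      rw [hse'def, PySem.Dict.getD_insert, List.count_append]
      by_cases h : s' = s
      · rw [if_pos h, hse s, h]
        simp
      · rw [if_neg h, hse s']
        have h2 : s ≠ s' := fun hh => h hh.symm
        simp [h2]
    have hstep : (pySplit s).foldl (fun ap w =>
          let c := (tc.getD w 0 - sc'.getD w 0) - (te.getD s 0 - se'.getD s 0)
          if c != 0 then ap.insert w (ap.getD w 0 + c) else ap) ap
        = stepSpec r ap s := by
      unfold stepSpec
      apply PySem.List.foldl_congr_mem
      intro acc w hw
      have happ : mot_apparait s w = true := (mot_apparait_iff s w).mpr hw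
      have hc : (tc.getD w 0 - sc'.getD w 0) - (te.getD s 0 - se'.getD s 0)
          = (r.countP (hitP s w) : Int) := by
        rw [htc w, hte s, hsc' w, hse' s]
        have h1 : full.countP (fun t => mot_apparait t w)
            = (pre ++ [s]).countP (fun t => mot_apparait t w) + r.countP (fun t => mot_apparait t w) := by
          rw [hfull, ← List.countP_append]
          simp
        have h2 : full.count s = (pre ++ [s]).count s + r.count s := by
          rw [hfull, ← List.count_append]
          simp
        have h3 := countP_split s w r happ
        push_cast [h1, h2, h3]
        ring
      simp only [hc]
      unfold addC
      rcases eq_or_ne ((r.countP (hitP s w) : Int)) 0 with h | h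
      · rw [if_neg (by simp [h]), if_pos h]
      · rw [if_pos (bne_iff_ne.mpr h), if_neg h]
    simp only [hstep, tailsFold]
    exact ih (pre ++ [s]) (by rw [hfull]; simp) (stepSpec r ap s) sc' se' hsc' hse'

lemma B_eq_tails (liste : List String) :
    compte_mot_alt liste = (tailsFold liste PySem.Dict.empty).items := by
  simp only [compte_mot_alt]
  obtain ⟨htc, hte⟩ := B_pass1 liste PySem.Dict.empty PySem.Dict.empty
  exact congrArg PySem.Dict.items
    (B_pass2 _ _ liste
      (fun w => by rw [htc w, PySem.Dict.getD_empty, zero_add])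
      (fun s' => by rw [hte s', PySem.Dict.getD_empty, zero_add])
      liste [] rfl PySem.Dict.empty PySem.Dict.empty PySem.Dict.empty
      (fun w => by simp) (fun s' => by simp))

-- ===== VERDICT (by name: the statement is the Claim_ definition above) =====
theorem compte_mot_spec : Claim_equal_compte_mot := by
  intro liste _
  unfold Spec_compte_mot
  rw [A_eq_tails, B_eq_tails]
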